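-- pv_equiv track=rewrite | github.com/luigisaetta/oci-cloud-consumption | utils/consumption_utils.py | _filter_rows_by_service
-- ===== SOURCE A (Python) =====
-- from typing import Any, Dict, List, Optional, Tuple
--
-- def _filter_rows_by_service(
--     rows: List[Dict[str, Any]],
--     service: str,
-- ) -> List[Dict[str, Any]]:
--     """Filter rows by service using exact then substring matching.
--
--     Args:
--         rows: Candidate rows.
--         service: Requested service text.
--
--     Returns:
--         Exact case-insensitive matches if present, otherwise substring matches.
--     """
--     service_cf = service.casefold()
--     exact = [row for row in rows if row.get("service", "").casefold() == service_cf]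
--     if exact:
--         return exact
--     return [row for row in rows if service_cf in row.get("service", "").casefold()]
-- ===== SOURCE B (Python) =====
-- def _filter_rows_by_service(rows, service):
--     """Score-and-select: rank every row once (2 = exact casefold match,
--     1 = substring match, 0 = no match), compute the best rank, and return
--     all rows achieving that rank when it is non-zero."""
--     service_cf = service.casefold()
--
--     def rank(row):
--         svc = row.get("service", "").casefold()
--         if svc == service_cf:
--             return 2
--         if service_cf in svc:
--             return 1
--         return 0
--
--     scored = [(rank(row), row) for row in rows]
--     best = max((t for t, _ in scored), default=0)
--     if best == 0:
--         return []
--     return [row for t, row in scored if t == best]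
-- ===== Notes on version B (the rewrite author's own statement) =====
-- stated objective: alternative
-- what changed: Replaces A's staged filter-then-fallback (exact-match scan, and a second substring scan only if the first is empty) by a score/argmax selection: each row is ranked once on a 3-level scale (2 exact, 1 substring, 0 none), the maximum rank is computed, and the rows achieving the best non-zero rank are returned; correct because an exact match also ranks above every substring-only match, reproducing A's exact-before-substring tie-break.
import Mathlib
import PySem

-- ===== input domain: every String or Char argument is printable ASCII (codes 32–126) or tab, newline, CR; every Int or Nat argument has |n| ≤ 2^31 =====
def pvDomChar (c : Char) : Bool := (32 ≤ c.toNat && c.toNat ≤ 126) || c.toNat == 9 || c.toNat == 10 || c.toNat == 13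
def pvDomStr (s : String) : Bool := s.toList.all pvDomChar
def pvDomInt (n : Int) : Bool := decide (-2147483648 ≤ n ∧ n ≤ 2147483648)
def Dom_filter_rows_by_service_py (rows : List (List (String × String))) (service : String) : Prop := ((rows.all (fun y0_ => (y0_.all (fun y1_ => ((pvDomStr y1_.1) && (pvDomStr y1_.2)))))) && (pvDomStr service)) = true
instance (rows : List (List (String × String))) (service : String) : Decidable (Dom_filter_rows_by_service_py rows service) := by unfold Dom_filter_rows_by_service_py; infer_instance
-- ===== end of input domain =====

-- B replaces A's staged filter-then-fallback by a score/argmax selection (rank rows 2/1/0, return the best non-zero tier); objective: alternative decomposition (same cost).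
-- (str.casefold is ported as PySem.Str.lower, exact on the ASCII domain Dom_ restricts to.)


-- ===== PORT A =====
-- row.get("service", "") on the association-list encoding of the dict (first match)
def pvGetService (row : List (String × String)) : String :=
  PySem.Dict.getD (PySem.Dict.mk row) "service" ""

def filter_rows_by_service_py (rows : List (List (String × String))) (service : String) : List (List (String × String)) :=
  let service_cf := PySem.Str.lower service
  let exact := rows.filter (fun row => PySem.Str.lower (pvGetService row) == service_cf)
  if exact ≠ [] then exact
  else rows.filter (fun row => PySem.Str.isIn service_cf (PySem.Str.lower (pvGetService row)))

-- ===== PORT B =====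
-- B's rank(row): 2 = exact casefold match, 1 = substring match, 0 = none
def pvRank (service_cf : String) (row : List (String × String)) : Int :=
  if PySem.Str.lower (pvGetService row) == service_cf then 2
  else if PySem.Str.isIn service_cf (PySem.Str.lower (pvGetService row)) then 1
  else 0

def filter_rows_by_service_py_alt (rows : List (List (String × String))) (service : String) : List (List (String × String)) :=
  let service_cf := PySem.Str.lower service
  let scored := rows.map (fun row => (pvRank service_cf row, row))
  -- max(gen, default=0): foldl max 0 is exact here since every rank is ≥ 0
  let best := (scored.map Prod.fst).foldl max 0
  if best == 0 then []
  else (scored.filter (fun p => p.1 == best)).map Prod.snd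

-- ===== PRECONDITION & SPEC =====
def Spec_filter_rows_by_service_py (rows : List (List (String × String))) (service : String) (out : List (List (String × String))) : Prop := out = filter_rows_by_service_py_alt rows service
instance (rows : List (List (String × String))) (service : String) (out : List (List (String × String))) : Decidable (Spec_filter_rows_by_service_py rows service out) := by unfold Spec_filter_rows_by_service_py; infer_instance

-- ===== CLAIM (what is proved, stated in full; the proofs are below) =====
def Claim_equal_filter_rows_by_service_py : Prop := ∀ (rows : List (List (String × String))) (service : String), Dom_filter_rows_by_service_py rows service → Spec_filter_rows_by_service_py rows service (filter_rows_by_service_py rows service)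

-- ===== LEMMAS AND PROOFS =====

-- foldl max: the result is the seed or a member of the list
theorem pv_foldl_max_cases (l : List Int) (a : Int) :
    l.foldl max a = a ∨ l.foldl max a ∈ l := by
  induction l generalizing a with
  | nil => exact Or.inl rfl
  | cons x xs ih =>
    rcases ih (max a x) with h | h
    · rcases max_choice a x with hm | hm
      · exact Or.inl (by rw [List.foldl_cons, h, hm])
      · exact Or.inr (by rw [List.foldl_cons, h, hm]; exact List.mem_cons_self)
    · exact Or.inr (List.mem_cons_of_mem _ h)

-- rank = 2 exactly on A's exact-match predicate
theorem pv_rank_eq_two (cf : String) (row : List (String × String)) :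
    (pvRank cf row == (2:Int)) = (PySem.Str.lower (pvGetService row) == cf) := by
  unfold pvRank
  split_ifs with h1 h2 <;> simp [h1]


theorem pv_rank_one_of_not_exact (cf : String) (row : List (String × String))
    (h : (PySem.Str.lower (pvGetService row) == cf) = false) :
    (pvRank cf row == (1:Int)) = PySem.Str.isIn cf (PySem.Str.lower (pvGetService row)) := by
  unfold pvRank
  split_ifs with h1 h2 <;> simp_all

-- scored-filter-then-project collapses to filtering the rows by the rank predicate
theorem pv_scored_filter (cf : String) (rows : List (List (String × String))) (b : Int) :
    (((rows.map (fun row => (pvRank cf row, row))).filter (fun p => p.1 == b)).map Prod.snd)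
      = rows.filter (fun row => pvRank cf row == b) := by
  induction rows with
  | nil => rfl
  | cons r rs ih =>
    by_cases h : (pvRank cf r == b) = true <;> simp [h, ih]

-- ===== VERDICT (by name: the statement is the Claim_ definition above) =====
theorem filter_rows_by_service_py_spec : Claim_equal_filter_rows_by_service_py := by
  intro rows service _
  unfold Spec_filter_rows_by_service_py filter_rows_by_service_py filter_rows_by_service_py_alt
  dsimp only
  rw [List.map_map]
  have hfst : (Prod.fst ∘ fun row => (pvRank (PySem.Str.lower service) row, row))
      = pvRank (PySem.Str.lower service) := rfl
  rw [hfst]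
  generalize hcf : PySem.Str.lower service = cf
  by_cases hex : rows.filter (fun row => PySem.Str.lower (pvGetService row) == cf) = []
  · -- no exact match: every rank is ≤ 1
    have hnoex : ∀ r ∈ rows, (PySem.Str.lower (pvGetService r) == cf) = false := by
      intro r hr
      simpa using (List.filter_eq_nil_iff.mp hex) r hr
    simp only [hex, ne_eq, not_true_eq_false, if_false]
    by_cases hsub : rows.filter (fun row => PySem.Str.isIn cf (PySem.Str.lower (pvGetService row))) = []
    · -- no substring match either: every rank is 0, best = 0, both return []
      have hz : ∀ r ∈ rows, pvRank cf r = 0 := by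
        intro r hr
        have h1 := hnoex r hr
        have h2 := (List.filter_eq_nil_iff.mp hsub) r hr
        unfold pvRank
        simp_all
      have hM0 : (rows.map (pvRank cf)).foldl max 0 = 0 := by
        rcases pv_foldl_max_cases (rows.map (pvRank cf)) 0 with h | h
        · exact h
        · rcases List.mem_map.mp h with ⟨r, hr, hv⟩
          rw [← hv]; exact hz r hr
      rw [hsub, hM0]
      simp
    · -- some substring match: best = 1, B filters exactly A's substring predicate
      have ⟨r0, hr0, hr0p⟩ : ∃ r ∈ rows, PySem.Str.isIn cf (PySem.Str.lower (pvGetService r)) = true := by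
        by_contra hc
        push Not at hc
        exact hsub (List.filter_eq_nil_iff.mpr (by intro a ha; simpa using hc a ha))
      have hle : ∀ r ∈ rows, pvRank cf r ≤ 1 := by
        intro r hr
        have := hnoex r hr
        unfold pvRank; split_ifs <;> simp_all
      have h1le : (1:Int) ≤ (rows.map (pvRank cf)).foldl max 0 := by
        have hmem : pvRank cf r0 ∈ rows.map (pvRank cf) := List.mem_map_of_mem hr0
        have h := (PySem.List.le_foldl_max (rows.map (pvRank cf)) 0).2 _ hmem
        have hr1 : pvRank cf r0 = 1 := by
          have := hnoex r0 hr0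
          unfold pvRank; simp_all
        omega
      have hM1 : (rows.map (pvRank cf)).foldl max 0 = 1 := by
        rcases pv_foldl_max_cases (rows.map (pvRank cf)) 0 with h | h
        · omega
        · rcases List.mem_map.mp h with ⟨r, hr, hv⟩
          have := hle r hr
          omega
      have hne1 : ((1:Int) == 0) = false := by decide
      rw [hM1, hne1]
      simp only [Bool.false_eq_true, if_false, pv_scored_filter]
      exact List.filter_congr (by
        intro r hr
        exact pv_rank_one_of_not_exact cf r (hnoex r hr)) |>.symm
  · -- some exact match: best = 2, B filters exactly A's exact predicate
    have ⟨r0, hr0, hr0p⟩ : ∃ r ∈ rows, (PySem.Str.lower (pvGetService r) == cf) = true := by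
      by_contra hc
      push Not at hc
      exact hex (List.filter_eq_nil_iff.mpr (by intro a ha; simpa using hc a ha))
    have hle : ∀ r ∈ rows, pvRank cf r ≤ 2 := by
      intro r hr; unfold pvRank; split_ifs <;> omega
    have h2le : (2:Int) ≤ (rows.map (pvRank cf)).foldl max 0 := by
      have hmem : pvRank cf r0 ∈ rows.map (pvRank cf) := List.mem_map_of_mem hr0
      have h := (PySem.List.le_foldl_max (rows.map (pvRank cf)) 0).2 _ hmem
      have hr2 : pvRank cf r0 = 2 := by unfold pvRank; simp_all
      omega
    have hM2 : (rows.map (pvRank cf)).foldl max 0 = 2 := by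
      rcases pv_foldl_max_cases (rows.map (pvRank cf)) 0 with h | h
      · omega
      · rcases List.mem_map.mp h with ⟨r, hr, hv⟩
        have := hle r hr
        omega
    have hne2 : ((2:Int) == 0) = false := by decide
    simp only [hex, ne_eq, not_false_eq_true, if_true]
    rw [hM2, hne2]
    simp only [Bool.false_eq_true, if_false, pv_scored_filter]
    exact List.filter_congr (by intro r hr; exact pv_rank_eq_two cf r) |>.symm
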